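-- pv_equiv track=rewrite | github.com/flext-sh/flext-ldif | src/flext_ldif/services/dn.py | hex_unescape
-- ===== SOURCE A (Python) =====
-- import string
--
-- def hex_unescape(value: str) -> str:
--     r"""Unescape hex format string per RFC 4514.
--
--     Converts \XX hex format back to characters.
--     Reverses the encoding done by hex_escape().
--
--     Args:
--         value: String in \XX hex escape format
--
--     Returns:
--         Decoded string
--
--     Example:
--         >>> FlextLdifDnService.hex_unescape("\\61\\62\\63")
--         'abc'
--         >>> FlextLdifDnService.hex_unescape("\\74\\65\\73\\74\\23\\31")
--         'test#1'
--
--     """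
--     if not value or "\\" not in value:
--         return value
--
--     result: list[str] = []
--     i = 0
--     while i < len(value):
--         if value[i] == "\\" and i + 2 < len(value):
--             # Try to parse hex code
--             hex_part = value[i + 1 : i + 3]
--             if all(c in string.hexdigits for c in hex_part):
--                 result.append(chr(int(hex_part, 16)))
--                 i += 3
--             else:
--                 # Not valid hex, include as-is
--                 result.append(value[i])
--                 i += 1
--         else:
--             result.append(value[i])
--             i += 1
--
--     return "".join(result)
-- ===== SOURCE B (Python) =====
-- import string
--
-- def hex_unescape(value: str) -> str:
--     # Split on backslashes once; each following segment either starts with two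
--     # hex digits (decode them) or keeps its backslash verbatim.
--     parts = value.split("\\")
--     out = [parts[0]]
--     for seg in parts[1:]:
--         if len(seg) >= 2 and seg[0] in string.hexdigits and seg[1] in string.hexdigits:
--             out.append(chr(int(seg[:2], 16)) + seg[2:])
--         else:
--             out.append("\\" + seg)
--     return "".join(out)
-- ===== Notes on version B (the rewrite author's own statement) =====
-- stated objective: simpler
-- what changed: Replaces A's manual index loop with greedy 3-or-1 advancement by a single split on backslash followed by per-segment decoding of a leading two-hex-digit pair.
import Mathlib
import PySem

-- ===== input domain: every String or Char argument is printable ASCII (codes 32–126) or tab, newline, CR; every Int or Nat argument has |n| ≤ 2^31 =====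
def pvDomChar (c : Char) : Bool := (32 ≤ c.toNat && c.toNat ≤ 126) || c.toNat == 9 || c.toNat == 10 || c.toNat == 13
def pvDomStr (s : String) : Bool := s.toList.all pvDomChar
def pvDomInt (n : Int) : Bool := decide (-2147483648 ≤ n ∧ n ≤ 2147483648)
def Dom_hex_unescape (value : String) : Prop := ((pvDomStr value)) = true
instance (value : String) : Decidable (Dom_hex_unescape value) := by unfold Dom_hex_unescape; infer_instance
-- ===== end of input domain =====

-- B replaces A's manual index loop by a single split on '\' followed by per-segment decoding (simpler, one pass, no index arithmetic).

-- shared character helpers: `c in string.hexdigits` and the value of a hex digit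
def pvIsHex (c : Char) : Bool :=
  (48 ≤ c.toNat && c.toNat ≤ 57) || (97 ≤ c.toNat && c.toNat ≤ 102) || (65 ≤ c.toNat && c.toNat ≤ 70)

def pvHexVal (c : Char) : Nat :=
  if c.toNat ≤ 57 then c.toNat - 48 else if c.toNat ≤ 70 then c.toNat - 55 else c.toNat - 87

-- ===== PORT A =====
-- the while loop: at '\' with two following chars, decode if both hex (consume 3), else copy one char
def pvLoopA : List Char → List Char
  | [] => []
  | '\\' :: d1 :: d2 :: rest =>
      if pvIsHex d1 && pvIsHex d2 then
        Char.ofNat (16 * pvHexVal d1 + pvHexVal d2) :: pvLoopA rest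
      else '\\' :: pvLoopA (d1 :: d2 :: rest)
  | c :: rest => c :: pvLoopA rest

def hex_unescape (value : String) : String :=
  if value = "" || !(value.toList.contains '\\') then value
  else String.ofList (pvLoopA value.toList)

-- ===== PORT B =====
-- hand transliteration of Python's value.split("\\") (one-char separator, keeps empty pieces; exact)
def pvSplitBS : List Char → List (List Char)
  | [] => [[]]
  | '\\' :: rest => [] :: pvSplitBS rest
  | c :: rest =>
      match pvSplitBS rest with
      | s :: ss => (c :: s) :: ss
      | [] => [[c]]

-- one segment after a backslash: decode its first two chars if hex, else keep the backslash
def pvSegB (seg : List Char) : List Char :=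
  match seg with
  | d1 :: d2 :: rest =>
      if pvIsHex d1 && pvIsHex d2 then Char.ofNat (16 * pvHexVal d1 + pvHexVal d2) :: rest
      else '\\' :: seg
  | _ => '\\' :: seg

def hex_unescape_alt (value : String) : String :=
  match pvSplitBS value.toList with
  | [] => ""
  | p :: rest => String.ofList (p ++ rest.flatMap pvSegB)

-- ===== PRECONDITION & SPEC =====
def Spec_hex_unescape (value : String) (out : String) : Prop := out = hex_unescape_alt value
instance (value : String) (out : String) : Decidable (Spec_hex_unescape value out) := by unfold Spec_hex_unescape; infer_instance

-- ===== CLAIM (what is proved, stated in full; the proofs are below) =====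
def Claim_equal_hex_unescape : Prop := ∀ (value : String), Dom_hex_unescape value → Spec_hex_unescape value (hex_unescape value)

-- ===== LEMMAS AND PROOFS =====

theorem pvLoopA_cons_ne (c : Char) (l : List Char) (h : c ≠ '\\') :
    pvLoopA (c :: l) = c :: pvLoopA l := by
  rcases l with _ | ⟨d1, _ | ⟨d2, r⟩⟩ <;> simp [pvLoopA, h]

theorem pvLoopA_append_free (s t : List Char) (h : '\\' ∉ s) :
    pvLoopA (s ++ t) = s ++ pvLoopA t := by
  induction s with
  | nil => rfl
  | cons c cs ih =>
      have hc : c ≠ '\\' := fun hc => h (hc ▸ List.mem_cons_self ..)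
      have := ih (fun hm => h (List.mem_cons_of_mem _ hm))
      simp [pvLoopA_cons_ne c _ hc, this]

theorem pvIsHex_bs : pvIsHex '\\' = false := by decide

theorem pvSplitBS_cons_ne (c : Char) (l : List Char) (h : c ≠ '\\') :
    pvSplitBS (c :: l) =
      (match pvSplitBS l with
       | s :: ss => (c :: s) :: ss
       | [] => [[c]]) := by
  rcases l with _ | ⟨d, ds⟩
  · simp [pvSplitBS]
  · by_cases hd : d = '\\' <;> simp [pvSplitBS, hd]

-- A's loop at a backslash followed by a backslash-free segment and then the rest of the glue
theorem pvLoopA_step (seg t : List Char) (hseg : '\\' ∉ seg)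
    (ht : t = [] ∨ ∃ u, t = '\\' :: u) :
    pvLoopA ('\\' :: (seg ++ t)) = pvSegB seg ++ pvLoopA t := by
  rcases seg with _ | ⟨d1, _ | ⟨d2, s'⟩⟩
  · -- empty segment: '\' followed directly by t
    rcases ht with rfl | ⟨u, rfl⟩
    · rfl
    · rcases u with _ | ⟨c, u'⟩
      · rfl
      · simp [pvLoopA, pvSegB, pvIsHex_bs]
  · -- one-char segment [d1]
    have hd1 : d1 ≠ '\\' := fun hc => hseg (hc ▸ List.mem_cons_self ..)
    rcases ht with rfl | ⟨u, rfl⟩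
    · simp [pvLoopA, pvSegB]
    · simp [pvLoopA, pvSegB, pvIsHex_bs, pvLoopA_cons_ne d1 _ hd1]
  · -- segment d1 :: d2 :: s'
    have hd1 : d1 ≠ '\\' := fun hc => hseg (hc ▸ List.mem_cons_self ..)
    have hd2 : d2 ≠ '\\' := fun hc => hseg (hc ▸ List.mem_cons_of_mem _ (List.mem_cons_self ..))
    have hs' : '\\' ∉ s' := fun hm => hseg (List.mem_cons_of_mem _ (List.mem_cons_of_mem _ hm))
    by_cases hhex : pvIsHex d1 && pvIsHex d2
    · simp [pvLoopA, pvSegB, hhex, pvLoopA_append_free s' t hs']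
    · simp [pvLoopA, pvSegB, hhex, pvLoopA_cons_ne d1 _ hd1,
        pvLoopA_cons_ne d2 _ hd2, pvLoopA_append_free s' t hs']

-- glue of backslash-prefixed segments
theorem pvLoopA_glue (segs : List (List Char)) (h : ∀ s ∈ segs, '\\' ∉ s) :
    pvLoopA (segs.flatMap (fun s => '\\' :: s)) = segs.flatMap pvSegB := by
  induction segs with
  | nil => rfl
  | cons s ss ih =>
      have hs : '\\' ∉ s := h s (List.mem_cons_self ..)
      have hss : ∀ x ∈ ss, '\\' ∉ x := fun x hx => h x (List.mem_cons_of_mem _ hx)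
      have ht : ss.flatMap (fun s => '\\' :: s) = [] ∨
          ∃ u, ss.flatMap (fun s => '\\' :: s) = '\\' :: u := by
        cases ss with
        | nil => exact Or.inl rfl
        | cons a as => exact Or.inr ⟨a ++ as.flatMap (fun s => '\\' :: s), rfl⟩
      simp only [List.flatMap_cons]
      rw [show ('\\' :: s) ++ ss.flatMap (fun s => '\\' :: s)
            = '\\' :: (s ++ ss.flatMap (fun s => '\\' :: s)) from rfl,
          pvLoopA_step s _ hs ht, ih hss]

-- pvSplitBS is nonempty, its pieces are backslash-free, and gluing them back gives the input
theorem pvSplitBS_spec (l : List Char) :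
    ∃ p ps, pvSplitBS l = p :: ps ∧ '\\' ∉ p ∧ (∀ s ∈ ps, '\\' ∉ s) ∧
      l = p ++ ps.flatMap (fun s => '\\' :: s) := by
  induction l with
  | nil => exact ⟨[], [], rfl, by simp, by simp, rfl⟩
  | cons c cs ih =>
      rcases ih with ⟨p, ps, hsplit, hp, hps, hglue⟩
      by_cases hc : c = '\\'
      · subst hc
        refine ⟨[], p :: ps, by simp [pvSplitBS, hsplit], by simp, ?_, by simp [hglue]⟩
        intro s hs
        rcases List.mem_cons.mp hs with rfl | hs
        · exact hp
        · exact hps s hs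
      · refine ⟨c :: p, ps, ?_, ?_, hps, by simp [hglue]⟩
        · rw [pvSplitBS_cons_ne c cs hc, hsplit]
        · intro hm
          rcases List.mem_cons.mp hm with rfl | hm
          · exact hc rfl
          · exact hp hm

-- if the input contains no backslash, B's result is the input
theorem pvAlt_no_bs (l : List Char) (h : '\\' ∉ l) :
    pvSplitBS l = [l] := by
  induction l with
  | nil => rfl
  | cons c cs ih =>
      have hc : c ≠ '\\' := fun hc => h (hc ▸ List.mem_cons_self ..)
      have := ih (fun hm => h (List.mem_cons_of_mem _ hm))
      rw [pvSplitBS_cons_ne c cs hc, this]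

-- ===== VERDICT (by name: the statement is the Claim_ definition above) =====
theorem hex_unescape_spec : Claim_equal_hex_unescape := by
  intro value _
  unfold Spec_hex_unescape hex_unescape hex_unescape_alt
  by_cases hbs : value.toList.contains '\\'
  · have hne : ¬ value = "" := by
      intro h; subst h; simp at hbs
    rcases pvSplitBS_spec value.toList with ⟨p, ps, hsplit, hp, hps, hglue⟩
    have halt : pvLoopA value.toList = p ++ ps.flatMap pvSegB := by
      rw [hglue, pvLoopA_append_free _ _ hp, pvLoopA_glue ps hps]
    simp [hne, hsplit, halt]
    intro h
    exact absurd (by simpa using hbs) h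
  · have hnotin : '\\' ∉ value.toList := by simpa using hbs
    simp [pvAlt_no_bs value.toList hnotin, String.ofList_toList]
    intro _ h
    exact absurd h hnotin
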